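-- pv_equiv track=rewrite | github.com/MichalZdanuk/Projekt_OD | flaskapp/pass_strength.py | contains_special_char
-- ===== SOURCE A (Python) =====
-- def contains_special_char(string):
--     k = 0
--     special_symbols = "!@#$%^&*()}{\|;:',./<>\"?"
--     tab = []
--     for char in string:
--             if(char in special_symbols):
--                     if(char not in tab):
--                         k += 1
--                         tab.append(char)
--             else:
--                 continue
--     return k
-- ===== SOURCE B (Python) =====
-- def contains_special_char(string):
--     special_symbols = "!@#$%^&*()}{\|;:',./<>\"?"
--     return sum(1 for sym in special_symbols if sym in string)
-- ===== Notes on version B (the rewrite author's own statement) =====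
-- stated objective: faster
-- what changed: Inverts the iteration: instead of scanning the string while maintaining a seen-list and counter, B scans the fixed duplicate-free special-symbol alphabet once and counts which symbols occur in the string via substring membership tests.
import Mathlib
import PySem

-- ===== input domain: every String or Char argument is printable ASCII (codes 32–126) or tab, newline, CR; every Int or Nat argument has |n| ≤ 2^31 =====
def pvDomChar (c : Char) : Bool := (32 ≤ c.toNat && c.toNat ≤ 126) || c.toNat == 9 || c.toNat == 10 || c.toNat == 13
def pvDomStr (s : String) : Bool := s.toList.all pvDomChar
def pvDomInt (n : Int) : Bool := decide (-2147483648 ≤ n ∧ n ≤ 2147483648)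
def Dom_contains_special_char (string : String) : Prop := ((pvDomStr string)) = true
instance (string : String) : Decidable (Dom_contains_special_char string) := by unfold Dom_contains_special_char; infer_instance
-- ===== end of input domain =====

-- B inverts the iteration: it scans the fixed duplicate-free special-symbol alphabet and counts which symbols occur in the string (objective: simpler).


-- the special_symbols literal (same constant in both Pythons)
def specialSymbols : List Char := "!@#$%^&*()}{\\|;:',./<>\"?".toList

-- ===== PORT A =====
-- one step of A's loop body: state = (k, tab)
def cscStep (st : Int × List Char) (char : Char) : Int × List Char :=
  if char ∈ specialSymbols then
    (if char ∉ st.2 then (st.1 + 1, st.2 ++ [char]) else st)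
  else st

def contains_special_char (string : String) : Int :=
  (string.toList.foldl cscStep (0, [])).1

-- ===== PORT B =====
def contains_special_char_alt (string : String) : Int :=
  specialSymbols.foldl (fun acc sym => if sym ∈ string.toList then acc + 1 else acc) 0

-- ===== PRECONDITION & SPEC =====
def Spec_contains_special_char (string : String) (out : Int) : Prop := out = contains_special_char_alt string
instance (string : String) (out : Int) : Decidable (Spec_contains_special_char string out) := by unfold Spec_contains_special_char; infer_instance

-- ===== CLAIM (what is proved, stated in full; the proofs are below) =====
def Claim_equal_contains_special_char : Prop := ∀ (string : String), Dom_contains_special_char string → Spec_contains_special_char string (contains_special_char string)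

-- ===== LEMMAS AND PROOFS =====

-- A's loop keeps k equal to tab's length
lemma cscFold_fst (l : List Char) : ∀ st : Int × List Char, st.1 = (st.2.length : Int) →
    (l.foldl cscStep st).1 = (((l.foldl cscStep st).2).length : Int) := by
  induction l with
  | nil => intro st h; simpa using h
  | cons c l ih =>
    intro st h
    simp only [List.foldl_cons]
    apply ih
    unfold cscStep
    split_ifs <;> simp [h]

-- membership in A's tab after the loop
lemma cscFold_mem (l : List Char) : ∀ (st : Int × List Char) (c : Char),
    c ∈ (l.foldl cscStep st).2 ↔ c ∈ st.2 ∨ (c ∈ specialSymbols ∧ c ∈ l) := by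
  induction l with
  | nil => intro st c; simp
  | cons a l ih =>
    intro st c
    simp only [List.foldl_cons, ih]
    unfold cscStep
    split_ifs with h1 h2
    · -- a already in tab: state unchanged
      constructor
      · rintro (hc | ⟨hs, hl⟩)
        · exact Or.inl hc
        · exact Or.inr ⟨hs, List.mem_cons_of_mem _ hl⟩
      · rintro (hc | ⟨hs, hl⟩)
        · exact Or.inl hc
        · rcases List.mem_cons.mp hl with rfl | hl
          · exact Or.inl h2
          · exact Or.inr ⟨hs, hl⟩
    · -- a appended to tab
      constructor
      · rintro (hc | ⟨hs, hl⟩)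
        · rcases List.mem_append.mp hc with hc | hc
          · exact Or.inl hc
          · rw [List.mem_singleton] at hc; subst hc
            exact Or.inr ⟨h1, List.mem_cons_self ..⟩
        · exact Or.inr ⟨hs, List.mem_cons_of_mem _ hl⟩
      · rintro (hc | ⟨hs, hl⟩)
        · exact Or.inl (List.mem_append_left _ hc)
        · rcases List.mem_cons.mp hl with rfl | hl
          · exact Or.inl (List.mem_append_right _ (List.mem_singleton_self _))
          · exact Or.inr ⟨hs, hl⟩
    · -- a not special: state unchanged
      constructor
      · rintro (hc | ⟨hs, hl⟩)
        · exact Or.inl hc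
        · exact Or.inr ⟨hs, List.mem_cons_of_mem _ hl⟩
      · rintro (hc | ⟨hs, hl⟩)
        · exact Or.inl hc
        · rcases List.mem_cons.mp hl with rfl | hl
          · exact absurd hs h1
          · exact Or.inr ⟨hs, hl⟩

-- A's tab stays duplicate-free
lemma cscFold_nodup (l : List Char) : ∀ st : Int × List Char, st.2.Nodup →
    (l.foldl cscStep st).2.Nodup := by
  induction l with
  | nil => intro st h; simpa using h
  | cons a l ih =>
    intro st h
    simp only [List.foldl_cons]
    apply ih
    unfold cscStep
    split_ifs with h1 h2
    · exact h
    · exact List.Nodup.append h (List.nodup_singleton a)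
        (by rw [List.disjoint_singleton]; exact h2)
    · exact h

-- B's fold counts the filtered length
lemma count_fold (p : Char → Prop) [DecidablePred p] (L : List Char) : ∀ acc : Int,
    L.foldl (fun a s => if p s then a + 1 else a) acc = acc + ((L.filter fun s => decide (p s)).length : Int) := by
  induction L with
  | nil => intro acc; simp
  | cons a L ih =>
    intro acc
    simp only [List.foldl_cons, List.filter_cons]
    by_cases h : p a <;> simp [h, ih] <;> omega

lemma specials_nodup : specialSymbols.Nodup := by decide

-- ===== VERDICT (by name: the statement is the Claim_ definition above) =====
theorem contains_special_char_spec : Claim_equal_contains_special_char := by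
  intro s _
  unfold Spec_contains_special_char contains_special_char contains_special_char_alt
  rw [count_fold (fun sym => sym ∈ s.toList)]
  rw [cscFold_fst _ _ rfl]
  have hperm : List.Perm (s.toList.foldl cscStep (0, [])).2
      (specialSymbols.filter fun sym => decide (sym ∈ s.toList)) := by
    rw [List.perm_ext_iff_of_nodup (cscFold_nodup _ _ (by simp))
      (List.Nodup.filter _ specials_nodup)]
    intro c
    simp [cscFold_mem]
  simp [hperm.length_eq]
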